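-- pv_equiv track=rewrite | github.com/chylkov/HSEworkspace | another_list_homework_Serdyuk.py | triangle_2
-- ===== SOURCE A (Python) =====
-- def triangle_2(N):
--     matrix = []
--     for i in range(N):
--         row = []
--         for j in range(N):
--             if (i >= j):
--                 row.append(1)
--             else:
--                 row.append(0)
--         matrix.append(row)
--     return matrix
-- ===== SOURCE B (Python) =====
-- def triangle_2(N):
--     return [[1] * (i + 1) + [0] * (N - i - 1) for i in range(N)]
-- ===== Notes on version B (the rewrite author's own statement) =====
-- stated objective: idiomatic
-- what changed: Replaces the nested element-wise branch loop with a comprehension building each row from two closed-form replicated blocks [1]*(i+1) + [0]*(N-i-1).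
import Mathlib
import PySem

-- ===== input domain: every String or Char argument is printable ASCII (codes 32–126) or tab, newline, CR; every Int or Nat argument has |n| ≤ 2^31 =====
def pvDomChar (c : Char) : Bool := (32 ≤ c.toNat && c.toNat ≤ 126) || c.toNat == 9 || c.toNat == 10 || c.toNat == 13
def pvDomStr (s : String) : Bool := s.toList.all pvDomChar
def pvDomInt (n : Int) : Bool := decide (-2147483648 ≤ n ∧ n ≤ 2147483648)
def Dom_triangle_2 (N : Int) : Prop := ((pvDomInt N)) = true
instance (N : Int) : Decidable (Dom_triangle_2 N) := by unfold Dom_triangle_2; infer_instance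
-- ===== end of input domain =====

-- B builds each row as two closed-form replicated blocks instead of A's element-wise branch loop (idiomatic).

-- ===== PORT A =====
def triangle_2 (N : Int) : List (List Int) :=
  (PySem.List.pyRange 0 N 1).foldl
    (fun matrix i =>
      matrix ++ [(PySem.List.pyRange 0 N 1).foldl
        (fun row j => if i ≥ j then row ++ [(1 : Int)] else row ++ [(0 : Int)]) []])
    []

-- ===== PORT B =====
def triangle_2_alt (N : Int) : List (List Int) :=
  (PySem.List.pyRange 0 N 1).map
    (fun i => List.replicate (i + 1).toNat (1 : Int) ++ List.replicate (N - i - 1).toNat (0 : Int))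

-- ===== PRECONDITION & SPEC =====
def Spec_triangle_2 (N : Int) (out : List (List Int)) : Prop := out = triangle_2_alt N
instance (N : Int) (out : List (List Int)) : Decidable (Spec_triangle_2 N out) := by unfold Spec_triangle_2; infer_instance

-- ===== CLAIM (what is proved, stated in full; the proofs are below) =====
def Claim_equal_triangle_2 : Prop := ∀ (N : Int), Dom_triangle_2 N → Spec_triangle_2 N (triangle_2 N)

-- ===== LEMMAS AND PROOFS =====

-- A's inner loop over j produces the two constant blocks of B's row, for any i with 0 ≤ i < N.
theorem triangle_2_row_eq (N i : Int) (h0 : 0 ≤ i) (hN : i < N) :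
    (PySem.List.pyRange 0 N 1).foldl
      (fun row j => if i ≥ j then row ++ [(1 : Int)] else row ++ [(0 : Int)]) []
    = List.replicate (i + 1).toNat (1 : Int) ++ List.replicate (N - i - 1).toNat (0 : Int) := by
  have hsplit : PySem.List.pyRange 0 N 1
      = PySem.List.pyRange 0 (i + 1) 1 ++ PySem.List.pyRange (i + 1) N 1 :=
    PySem.List.pyRange_one_append 0 (i + 1) N (by omega) (by omega)
  have hfold : ∀ (l : List Int) (acc : List Int),
      l.foldl (fun row j => if i ≥ j then row ++ [(1 : Int)] else row ++ [(0 : Int)]) acc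
      = acc ++ l.map (fun j => if i ≥ j then (1 : Int) else 0) := by
    intro l
    induction l with
    | nil => simp
    | cons x xs ih =>
      intro acc
      by_cases hx : i ≥ x <;> simp [hx, ih, List.append_assoc]
  rw [hsplit, List.foldl_append, hfold, hfold, List.nil_append]
  congr 1
  · rw [List.eq_replicate_iff]
    refine ⟨by simp [PySem.List.length_pyRange_one], ?_⟩
    intro b hb
    simp only [List.mem_map] at hb
    obtain ⟨j, hj, rfl⟩ := hb
    rw [PySem.List.mem_pyRange_one] at hj
    simp [show i ≥ j by omega]
  · rw [List.eq_replicate_iff]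
    refine ⟨by simp [PySem.List.length_pyRange_one]; omega, ?_⟩
    intro b hb
    simp only [List.mem_map] at hb
    obtain ⟨j, hj, rfl⟩ := hb
    rw [PySem.List.mem_pyRange_one] at hj
    simp [show ¬ i ≥ j by omega]

-- ===== VERDICT (by name: the statement is the Claim_ definition above) =====
theorem triangle_2_spec : Claim_equal_triangle_2 := by
  intro N _
  unfold Spec_triangle_2 triangle_2 triangle_2_alt
  rw [PySem.List.foldl_append_singleton_eq_map, List.nil_append]
  apply List.map_congr_left
  intro i hi
  rw [PySem.List.mem_pyRange_one] at hi
  exact triangle_2_row_eq N i hi.1 hi.2
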